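-- pv_equiv track=rewrite | github.com/ksydata/pseudonymizer | pseudonymizer/pseudonymizers/numcategorization.py | pseudonymizeIncome
-- ===== SOURCE A (Python) =====
-- def pseudonymizeIncome(income, grouping_standard):
--     """소득금액 범주화 메서드
--     소득을 전체 대상자를 9분위(2024년 건강보험료 1인 기준 소득분위)로 균등 분할"""
--     if grouping_standard is None:
--         threshold_list= [1841500, 2025500, 2675000, 2897000, 3120000, 3343000, 3566000, 3789000, 4012000]
--         for index, threshold in enumerate(threshold_list, start = 1):
--             if income <= threshold:
--                 return f"{index}분위"
--     else:
--     # While grouping_standard True: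
--         grouping_standard.sort()
--         # 오름차순 정렬 시 일반적으로 사용하는 버블 정렬은 O(N**2)이므로
--         # 시간복잡도 낮추려면 병합 정렬 O(NlogN) 활용 -> 추후 merge_sort() 메서드 적용하여 리팩토링
--         for index, grouping_standard in enumerate(grouping_standard, start = 1):
--             if income <= grouping_standard:
--                 return f"{index}분위"
-- ===== SOURCE B (Python) =====
-- def pseudonymizeIncome(income, grouping_standard):
--     if grouping_standard is None:
--         thresholds = [1841500, 2025500, 2675000, 2897000, 3120000, 3343000, 3566000, 3789000, 4012000]
--     else:
--         grouping_standard.sort()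
--         thresholds = grouping_standard
--     # binary search for the first index with income <= thresholds[i] (bisect_left)
--     lo, hi = 0, len(thresholds)
--     while lo < hi:
--         mid = (lo + hi) // 2
--         if thresholds[mid] < income:
--             lo = mid + 1
--         else:
--             hi = mid
--     if lo < len(thresholds):
--         return f"{lo + 1}분위"
--     return None
-- ===== Notes on version B (the rewrite author's own statement) =====
-- stated objective: alternative
-- what changed: Replaces the sequential first-match threshold scan (in both the default-list and sorted-list branches) with a single hand-written bisect_left binary search over the unified threshold list, returning None explicitly when income exceeds all thresholds.
import Mathlib
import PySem

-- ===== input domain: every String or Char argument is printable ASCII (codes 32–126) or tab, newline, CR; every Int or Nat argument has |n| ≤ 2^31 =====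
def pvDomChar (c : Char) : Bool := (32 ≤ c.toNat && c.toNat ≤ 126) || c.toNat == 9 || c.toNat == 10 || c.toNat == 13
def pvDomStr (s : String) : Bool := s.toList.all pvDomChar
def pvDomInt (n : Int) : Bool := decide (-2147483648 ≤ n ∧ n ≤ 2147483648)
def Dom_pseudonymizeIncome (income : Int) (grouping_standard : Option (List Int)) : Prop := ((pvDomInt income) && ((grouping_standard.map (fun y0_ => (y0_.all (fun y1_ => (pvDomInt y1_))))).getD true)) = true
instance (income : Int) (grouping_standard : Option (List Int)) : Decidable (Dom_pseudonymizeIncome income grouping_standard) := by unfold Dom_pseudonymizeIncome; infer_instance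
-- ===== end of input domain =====

-- B replaces A's sequential first-match scan with a binary search (bisect_left) over the thresholds (objective: alternative).
-- Both A and B sort grouping_standard in place (same mutation); the equivalence proved is about the return value.
-- ===== PORT A =====
-- A: sequential first-match scan over the thresholds (enumerate from 1, return on first income <= t).
def pvScanA (income : Int) : List Int → Int → Option String
  | [], _ => none
  | t :: ts, idx =>
      if income ≤ t then some (PySem.Int.toStr idx ++ "분위")
      else pvScanA income ts (idx + 1)

def pseudonymizeIncome (income : Int) (grouping_standard : Option (List Int)) : Option String :=
  match grouping_standard with
  | none =>
      pvScanA income [1841500, 2025500, 2675000, 2897000, 3120000, 3343000, 3566000, 3789000, 4012000] 1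
  | some l =>
      pvScanA income (PySem.List.sorted l (fun x => x) false) 1

-- ===== PORT B =====
-- B: hand-written binary search (bisect_left) for the first index with income <= thresholds[i].
def pvBisect (income : Int) (xs : List Int) (lo hi : Nat) : Nat :=
  if h : lo < hi then
    let mid := (lo + hi) / 2
    if xs.getD mid 0 < income then pvBisect income xs (mid + 1) hi
    else pvBisect income xs lo mid
  else lo
termination_by hi - lo
decreasing_by all_goals omega

def pseudonymizeIncome_alt (income : Int) (grouping_standard : Option (List Int)) : Option String :=
  let thresholds :=
    match grouping_standard with
    | none => [1841500, 2025500, 2675000, 2897000, 3120000, 3343000, 3566000, 3789000, 4012000]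
    | some l => PySem.List.sorted l (fun x => x) false
  let lo := pvBisect income thresholds 0 thresholds.length
  if lo < thresholds.length then some (PySem.Int.toStr ((lo : Int) + 1) ++ "분위") else none

-- ===== PRECONDITION & SPEC =====
def Spec_pseudonymizeIncome (income : Int) (grouping_standard : Option (List Int)) (out : Option String) : Prop := out = pseudonymizeIncome_alt income grouping_standard
instance (income : Int) (grouping_standard : Option (List Int)) (out : Option String) : Decidable (Spec_pseudonymizeIncome income grouping_standard out) := by unfold Spec_pseudonymizeIncome; infer_instance


-- ===== CLAIM (what is proved, stated in full; the proofs are below) =====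
def Claim_equal_pseudonymizeIncome : Prop := ∀ (income : Int) (grouping_standard : Option (List Int)), Dom_pseudonymizeIncome income grouping_standard → Spec_pseudonymizeIncome income grouping_standard (pseudonymizeIncome income grouping_standard)

-- ===== LEMMAS AND PROOFS =====
-- tw xs = number of leading elements < income (= bisect_left position on a sorted list)
def pvTw (income : Int) : List Int → Nat
  | [] => 0
  | t :: ts => if t < income then pvTw income ts + 1 else 0

theorem pvTw_le (income : Int) (xs : List Int) : pvTw income xs ≤ xs.length := by
  induction xs with
  | nil => simp [pvTw]
  | cons t ts ih => simp only [pvTw, List.length_cons]; split <;> omega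

theorem pvTw_lt (income : Int) (xs : List Int) (j : Nat) (hj : j < pvTw income xs)
    (hl : j < xs.length) : xs[j] < income := by
  induction xs generalizing j with
  | nil => simp at hl
  | cons t ts ih =>
      simp only [pvTw] at hj
      split at hj
      · cases j with
        | zero => simpa
        | succ j =>
            simp only [List.getElem_cons_succ]
            exact ih j (by omega) (by simpa using Nat.lt_of_succ_lt_succ hl)
      · omega

theorem pvTw_ge (income : Int) (xs : List Int) (h : pvTw income xs < xs.length) :
    income ≤ xs[pvTw income xs] := by
  induction xs with
  | nil => simp at h
  | cons t ts ih =>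
      simp only [pvTw] at h ⊢
      by_cases ht : t < income
      · simp only [if_pos ht]
        simpa using ih (by simp only [List.length_cons] at h; simpa [if_pos ht] using Nat.lt_of_succ_lt_succ (by simpa [if_pos ht] using h))
      · simp only [if_neg ht, List.getElem_cons_zero]; omega

-- A's scan equals the tw formulation
theorem pvScanA_eq (income : Int) (xs : List Int) (k : Int) :
    pvScanA income xs k =
      if pvTw income xs < xs.length
      then some (PySem.Int.toStr (k + (pvTw income xs : Int)) ++ "분위") else none := by
  induction xs generalizing k with
  | nil => simp [pvScanA, pvTw]
  | cons t ts ih =>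
      simp only [pvScanA, pvTw, List.length_cons]
      by_cases hle : income ≤ t
      · have : ¬ t < income := by omega
        simp [hle, this]
      · have ht : t < income := by omega
        simp only [if_neg hle, if_pos ht, ih]
        by_cases h2 : pvTw income ts < ts.length
        · rw [if_pos h2, if_pos (by omega : pvTw income ts + 1 < ts.length + 1)]
          congr 3
          push_cast
          ring
        · rw [if_neg h2, if_neg (by omega : ¬ (pvTw income ts + 1 < ts.length + 1))]

-- binary search on a sorted list lands exactly at pvTw
theorem pvBisect_eq (income : Int) (xs : List Int)
    (hs : List.Pairwise (· ≤ ·) xs) (lo hi : Nat) (hlohi : lo ≤ hi) (hhil : hi ≤ xs.length)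
    (inv1 : ∀ j, j < lo → (hj : j < xs.length) → xs[j] < income)
    (inv2 : ∀ j, hi ≤ j → (hj : j < xs.length) → income ≤ xs[j]) :
    pvBisect income xs lo hi = pvTw income xs := by
  have hmono : ∀ (i j : Nat) (hi' : i < xs.length) (hj : j < xs.length), i ≤ j → xs[i] ≤ xs[j] := by
    intro i j hi' hj hij
    rcases Nat.eq_or_lt_of_le hij with rfl | hlt
    · exact le_rfl
    · exact List.pairwise_iff_getElem.mp hs i j hi' hj hlt
  have main : ∀ d lo hi, hi - lo = d → lo ≤ hi → hi ≤ xs.length →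
      (∀ j, j < lo → (hj : j < xs.length) → xs[j] < income) →
      (∀ j, hi ≤ j → (hj : j < xs.length) → income ≤ xs[j]) →
      pvBisect income xs lo hi = pvTw income xs := by
    intro d
    induction d using Nat.strong_induction_on with
    | _ d ih =>
      intro lo hi hd hlohi' hhil' inv1' inv2'
      rw [pvBisect]
      by_cases h : lo < hi
      · rw [dif_pos h]
        show (if xs.getD ((lo + hi) / 2) 0 < income then pvBisect income xs ((lo + hi) / 2 + 1) hi
              else pvBisect income xs lo ((lo + hi) / 2)) = pvTw income xs
        have hm1 : lo ≤ (lo + hi) / 2 := by omega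
        have hm2 : (lo + hi) / 2 < hi := by omega
        have hml : (lo + hi) / 2 < xs.length := by omega
        rw [List.getD_eq_getElem xs 0 hml]
        by_cases hc : xs[(lo + hi) / 2] < income
        · rw [if_pos hc]
          exact ih (hi - ((lo + hi) / 2 + 1)) (by omega) ((lo + hi) / 2 + 1) hi rfl
            (by omega) hhil'
            (by intro j hj hjl
                have := hmono j ((lo + hi) / 2) hjl hml (by omega)
                omega)
            inv2'
        · rw [if_neg hc]
          exact ih ((lo + hi) / 2 - lo) (by omega) lo ((lo + hi) / 2) rfl
            (by omega) (by omega) inv1'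
            (by intro j hj hjl
                have := hmono ((lo + hi) / 2) j hml hjl hj
                omega)
      · rw [dif_neg h]
        have hlo : lo = hi := by omega
        by_contra hne
        rcases Nat.lt_or_ge lo (pvTw income xs) with hl | hg
        · have hlolen : lo < xs.length := by have := pvTw_le income xs; omega
          have h1 := pvTw_lt income xs lo hl hlolen
          have h2 := inv2' lo (by omega) hlolen
          omega
        · have hlt : pvTw income xs < lo := by omega
          have hlen : pvTw income xs < xs.length := by omega
          have h1 := inv1' (pvTw income xs) hlt hlen
          have h2 := pvTw_ge income xs hlen
          omega
  exact main (hi - lo) lo hi rfl hlohi hhil inv1 inv2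

theorem pseudonymizeIncome_scan_bisect (income : Int) (xs : List Int)
    (hs : List.Pairwise (· ≤ ·) xs) :
    pvScanA income xs 1 =
      (if pvBisect income xs 0 xs.length < xs.length
       then some (PySem.Int.toStr ((pvBisect income xs 0 xs.length : Int) + 1) ++ "분위") else none) := by
  rw [pvScanA_eq, pvBisect_eq income xs hs 0 xs.length (Nat.zero_le _) le_rfl
        (by intro j hj hjl; omega) (by intro j hj hjl; omega)]
  by_cases h : pvTw income xs < xs.length
  · rw [if_pos h, if_pos h]
    congr 3
    ring
  · rw [if_neg h, if_neg h]

-- ===== VERDICT (by name: the statement is the Claim_ definition above) =====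
theorem pseudonymizeIncome_spec : Claim_equal_pseudonymizeIncome := by
  intro income gs _
  unfold Spec_pseudonymizeIncome pseudonymizeIncome pseudonymizeIncome_alt
  cases gs with
  | none =>
      simp only
      exact pseudonymizeIncome_scan_bisect income _ (by decide)
  | some l =>
      simp only
      exact pseudonymizeIncome_scan_bisect income _
        (by simpa using PySem.List.sorted_pairwise (xs := l) (key := fun x => x))
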